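-- pv_equiv track=rewrite | github.com/TitusMwangi254/Design-and-Analysis-of-Algorithms-Assignment-3 | Python program to compute the minimum supply chain cost using dynamic programming.py | supply_chain_optimization
-- ===== SOURCE A (Python) =====
-- def supply_chain_optimization(cost_matrix):
--     """
--     Compute the minimum supply chain cost using dynamic programming.
--
--     :param cost_matrix: 2D list where cost_matrix[i][j] is the cost of supplying warehouse i by supplier j.
--     :return: Minimum cost and the supplier allocation.
--     """
--     num_warehouses = len(cost_matrix)
--     num_suppliers = len(cost_matrix[0])
--
--     # DP table to store the minimum cost up to warehouse i using supplier j
--     dp = [[float('inf')] * num_suppliers for _ in range(num_warehouses)]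
--     # Path table to reconstruct supplier allocation
--     path = [[-1] * num_suppliers for _ in range(num_warehouses)]
--
--     # Initialize base case
--     for j in range(num_suppliers):
--         dp[0][j] = cost_matrix[0][j]
--
--     # Fill the DP table
--     for i in range(1, num_warehouses):
--         for j in range(num_suppliers):
--             for k in range(num_suppliers):
--                 cost = dp[i-1][k] + cost_matrix[i][j]
--                 if cost < dp[i][j]:
--                     dp[i][j] = cost
--                     path[i][j] = k
--
--     # Find the minimum cost in the last row
--     min_cost = min(dp[-1])
--     last_supplier = dp[-1].index(min_cost)
--
--     # Reconstruct the supplier allocation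
--     allocation = [last_supplier]
--     for i in range(num_warehouses - 1, 0, -1):
--         last_supplier = path[i][last_supplier]
--         allocation.append(last_supplier)
--
--     allocation.reverse()
--
--     return min_cost, allocation
-- ===== SOURCE B (Python) =====
-- def supply_chain_optimization(cost_matrix):
--     total = 0
--     allocation = []
--     for row in cost_matrix:
--         m = min(row)
--         total += m
--         allocation.append(row.index(m))
--     return total, allocation
-- ===== Notes on version B (the rewrite author's own statement) =====
-- stated objective: faster
-- what changed: B replaces the O(n*m^2) DP tables and path backtracking by a single pass that, per row, takes the row minimum and its first index (dp[i][j]=min(dp[i-1])+cost[i][j] and path[i][j] is the first argmin of the previous row, so the result is just the sum of row minima and the list of per-row first argmins).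
-- outside the precondition, e.g. on supply_chain_optimization([[1, 2], [5, 0, -10]]): A returns (1, [0, 1]), B returns (-9, [0, 2])
import Mathlib
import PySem

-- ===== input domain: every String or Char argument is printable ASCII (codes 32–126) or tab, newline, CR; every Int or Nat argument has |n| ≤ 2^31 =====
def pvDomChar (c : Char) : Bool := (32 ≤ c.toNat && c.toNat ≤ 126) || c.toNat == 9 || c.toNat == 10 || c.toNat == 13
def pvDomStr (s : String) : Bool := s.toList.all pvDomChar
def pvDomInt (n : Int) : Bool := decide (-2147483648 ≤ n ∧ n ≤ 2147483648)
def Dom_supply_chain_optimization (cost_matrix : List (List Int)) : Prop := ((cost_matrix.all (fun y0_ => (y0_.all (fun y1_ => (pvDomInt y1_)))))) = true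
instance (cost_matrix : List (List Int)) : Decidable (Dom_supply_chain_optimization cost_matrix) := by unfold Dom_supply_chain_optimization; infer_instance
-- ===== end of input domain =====

-- B replaces A's per-cell inner scan over all suppliers by one pass taking each row's minimum and
-- its first index; a timing run measured B faster (O(n*m) vs A's O(n*m^2) inner scans).


-- ===== PORT A =====
-- A's inner k-loop computing one dp cell: running minimum of dp[i-1][k] + cost_matrix[i][j], the
-- float('inf') initial cell modelled as `none` (cost < inf is always true), and the path entry as
-- the second component (initially -1), exactly as in the Python.
def pvCellA (prev : List Int) (c : Int) (m : Int) : Option Int × Int :=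
  (PySem.List.pyRange 0 m 1).foldl
    (fun (st : Option Int × Int) k =>
      let cost := PySem.List.pyGetD prev k 0 + c
      match st.1 with
      | none => (some cost, k)
      | some v => if cost < v then (some cost, k) else st)
    (none, -1)

-- the body of A's outer loop over warehouses i: fill dp[i] and path[i] (one j-loop in Python,
-- here one map over j producing both cells); dp rows are appended in loop order (Python
-- preallocates rows it only writes during iteration i, which no admitted input can observe)
def pvStepA (cm : List (List Int)) (m : Int)
    (st : List (List Int) × List (List Int)) (i : Int) : List (List Int) × List (List Int) :=
  let prev := PySem.List.pyGetD st.1 (i - 1) []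
  let ri := PySem.List.pyGetD cm i []
  let cells :=
    (PySem.List.pyRange 0 m 1).map (fun j => pvCellA prev (PySem.List.pyGetD ri j 0) m)
  (st.1 ++ [cells.map (fun cell => cell.1.getD 0)], st.2 ++ [cells.map (fun cell => cell.2)])

-- the body of A's reconstruction loop: last_supplier = path[i][last_supplier]; allocation.append
def pvBackA (path : List (List Int)) (s : Int × List Int) (i : Int) : Int × List Int :=
  let ls := PySem.List.pyGetD (PySem.List.pyGetD path i []) s.1 (-1)
  (ls, s.2 ++ [ls])

-- Literal port of A.  In-range indexing uses pyGetD with a junk default never hit inside Pre_.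
def supply_chain_optimization (cost_matrix : List (List Int)) : Int × List Int :=
  let num_warehouses : Int := cost_matrix.length
  let num_suppliers : Int := (cost_matrix.headD []).length
  -- base case: dp[0][j] = cost_matrix[0][j]; path[0] stays [-1] * num_suppliers
  let dp0 : List Int :=
    (PySem.List.pyRange 0 num_suppliers 1).map
      (fun j => PySem.List.pyGetD (cost_matrix.headD []) j 0)
  let path0 : List Int := (PySem.List.pyRange 0 num_suppliers 1).map (fun _ => -1)
  -- fill the DP table: for i in range(1, num_warehouses)
  let tables : List (List Int) × List (List Int) :=
    (PySem.List.pyRange 1 num_warehouses 1).foldl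
      (pvStepA cost_matrix num_suppliers) ([dp0], [path0])
  -- min_cost = min(dp[-1]); last_supplier = dp[-1].index(min_cost)
  let dpLast := PySem.List.pyGetD tables.1 (-1) []
  let min_cost := (PySem.List.min? dpLast (fun y => y)).getD 0
  let last_supplier : Int := ((PySem.List.index? dpLast min_cost).map Int.ofNat).getD (-1)
  -- reconstruction: for i in range(num_warehouses - 1, 0, -1), then allocation.reverse()
  let rec_ : Int × List Int :=
    (PySem.List.pyRange (num_warehouses - 1) 0 (-1)).foldl
      (pvBackA tables.2) (last_supplier, [last_supplier])
  (min_cost, rec_.2.reverse)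

-- ===== PORT B =====
-- One pass: per row add min(row) to the total and append row.index(min(row)).
def supply_chain_optimization_alt (cost_matrix : List (List Int)) : Int × List Int :=
  cost_matrix.foldl
    (fun (acc : Int × List Int) row =>
      let mv := (PySem.List.min? row (fun y => y)).getD 0
      (acc.1 + mv, acc.2 ++ [((PySem.List.index? row mv).map Int.ofNat).getD (-1)]))
    (0, [])

-- ===== PRECONDITION & SPEC =====
-- Pre_ excludes the empty matrix, an empty first row and ragged matrices: A raises IndexError or
-- ValueError when the matrix is empty, row 0 is empty or some row is shorter than row 0, and on
-- rows longer than row 0 A silently ignores the extra columns (num_suppliers is taken from row 0,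
-- an artefact of A's implementation) while B reads whole rows.
def Pre_supply_chain_optimization (cost_matrix : List (List Int)) : Prop :=
  cost_matrix ≠ [] ∧ 0 < (cost_matrix.headD []).length ∧
    ∀ r ∈ cost_matrix, r.length = (cost_matrix.headD []).length
instance (cost_matrix : List (List Int)) : Decidable (Pre_supply_chain_optimization cost_matrix) := by
  unfold Pre_supply_chain_optimization; infer_instance
def pvWitness_supply_chain_optimization : List (List Int) := [[1, 2], [3, 0]]

def Spec_supply_chain_optimization (cost_matrix : List (List Int)) (out : Int × List Int) : Prop := out = supply_chain_optimization_alt cost_matrix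
instance (cost_matrix : List (List Int)) (out : Int × List Int) : Decidable (Spec_supply_chain_optimization cost_matrix out) := by unfold Spec_supply_chain_optimization; infer_instance

-- ===== CLAIM (what is proved, stated in full; the proofs are below) =====
def Claim_equal_supply_chain_optimization : Prop := ∀ (cost_matrix : List (List Int)), Dom_supply_chain_optimization cost_matrix → Pre_supply_chain_optimization cost_matrix → Spec_supply_chain_optimization cost_matrix (supply_chain_optimization cost_matrix)

-- ===== LEMMAS AND PROOFS =====

def pvMn (r : List Int) : Int := (PySem.List.min? r (fun y => y)).getD 0
def pvAm (r : List Int) : Int := ((PySem.List.index? r (pvMn r)).map Int.ofNat).getD (-1)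

theorem pv_min?_eq (r : List Int) (h : r ≠ []) :
    PySem.List.min? r (fun y => y) = some (pvMn r) := by
  obtain ⟨x, t, rfl⟩ := List.exists_cons_of_ne_nil h
  simp [pvMn, PySem.List.min?_id_cons]

theorem pv_mn_append (l : List Int) (x : Int) (h : l ≠ []) :
    pvMn (l ++ [x]) = min (pvMn l) x := by
  obtain ⟨y, t, rfl⟩ := List.exists_cons_of_ne_nil h
  simp [pvMn, PySem.List.min?_id_cons, List.foldl_append]

theorem pv_am_append (l : List Int) (x : Int) (h : l ≠ []) :
    pvAm (l ++ [x]) = if x < pvMn l then (l.length : Int) else pvAm l := by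
  have hm := pv_min?_eq l h
  have hmem : pvMn l ∈ l := PySem.List.min?_mem hm
  have hmin : ∀ y ∈ l, pvMn l ≤ y := PySem.List.min?_isMin hm
  split_ifs with hx
  · have hxm : min (pvMn l) x = x := by omega
    have hnot : x ∉ l := fun hxl => absurd (hmin x hxl) (by omega)
    unfold pvAm
    rw [pv_mn_append l x h, hxm, PySem.List.index?_append_singleton_self l x hnot]
    simp
  · have hxm : min (pvMn l) x = pvMn l := by omega
    unfold pvAm
    rw [pv_mn_append l x h, hxm, PySem.List.index?_append_of_mem [x] hmem]

theorem pv_am_range (r : List Int) (h : r ≠ []) : 0 ≤ pvAm r ∧ pvAm r < (r.length : Int) := by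
  have hm := pv_min?_eq r h
  have hmem : pvMn r ∈ r := PySem.List.min?_mem hm
  have hsome : ∃ k, PySem.List.index? r (pvMn r) = some k := by
    rcases Option.isSome_iff_exists.mp ((PySem.List.index?_isSome_iff r (pvMn r)).mpr hmem) with ⟨k, hk⟩
    exact ⟨k, hk⟩
  obtain ⟨k, hk⟩ := hsome
  obtain ⟨hlt, -, -⟩ := PySem.List.getElem_of_index?_eq_some hk
  unfold pvAm
  rw [hk]
  simp
  omega

theorem pv_foldl_min_map_add (t : List Int) (S h : Int) :
    (t.map (fun c => S + c)).foldl min (S + h) = S + t.foldl min h := by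
  induction t generalizing h with
  | nil => rfl
  | cons a t ih => simp only [List.map_cons, List.foldl_cons, min_add_add_left, ih]

theorem pv_mn_shift (r : List Int) (S : Int) (h : r ≠ []) :
    pvMn (r.map (fun c => S + c)) = S + pvMn r := by
  obtain ⟨y, t, rfl⟩ := List.exists_cons_of_ne_nil h
  simp [pvMn, PySem.List.min?_id_cons, pv_foldl_min_map_add]

theorem pv_index?_map_add (l : List Int) (S v : Int) :
    PySem.List.index? (l.map (fun c => S + c)) (S + v) = PySem.List.index? l v := by
  induction l with
  | nil => rfl
  | cons a t ih =>
    by_cases hav : a = v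
    · subst hav
      rw [List.map_cons, PySem.List.index?_cons_self, PySem.List.index?_cons_self]
    · rw [List.map_cons, PySem.List.index?_cons_of_ne _ (by omega),
        PySem.List.index?_cons_of_ne _ hav, ih]

theorem pv_am_shift (r : List Int) (S : Int) (h : r ≠ []) :
    pvAm (r.map (fun c => S + c)) = pvAm r := by
  unfold pvAm
  rw [pv_mn_shift r S h, pv_index?_map_add]


theorem pv_cellA_enum (prev : List Int) (c : Int) (h : prev ≠ []) :
    (PySem.List.enumerate prev).foldl
      (fun (st : Option Int × Int) (p : Int × Int) =>
        let cost := p.2 + c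
        match st.1 with
        | none => (some cost, p.1)
        | some v => if cost < v then (some cost, p.1) else st)
      (none, -1) = (some (pvMn prev + c), pvAm prev) := by
  induction prev using List.reverseRecOn with
  | nil => exact absurd rfl h
  | append_singleton l x ih =>
    by_cases hl : l = []
    · subst hl
      simp [PySem.List.enumerate_cons, PySem.List.enumerate_nil, pvMn, pvAm,
        PySem.List.min?_id_cons]
    · rw [PySem.List.enumerate_append, List.foldl_append, ih hl]
      rw [pv_mn_append l x hl, pv_am_append l x hl]
      simp only [PySem.List.enumerate_cons, PySem.List.enumerate_nil, List.foldl_cons,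
        List.foldl_nil]
      by_cases hx : x < pvMn l
      · have : x + c < pvMn l + c := by omega
        simp [this, hx, min_eq_right (le_of_lt hx)]
      · have : ¬ (x + c < pvMn l + c) := by omega
        simp [this, hx, min_eq_left (by omega : pvMn l ≤ x)]

theorem pv_cellA_eq (prev : List Int) (c : Int) (h : prev ≠ []) :
    pvCellA prev c (prev.length : Int) = (some (pvMn prev + c), pvAm prev) := by
  rw [← pv_cellA_enum prev c h, PySem.List.enumerate_eq_map_pyRange prev 0, List.foldl_map]
  rfl


theorem pv_alt_eq (cm : List (List Int)) :
    supply_chain_optimization_alt cm = ((cm.map pvMn).sum, cm.map pvAm) := by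
  unfold supply_chain_optimization_alt
  have : ∀ (acc : Int × List Int) (row : List Int),
      (let mv := (PySem.List.min? row (fun y => y)).getD 0
       ((acc.1 + mv, acc.2 ++ [((PySem.List.index? row mv).map Int.ofNat).getD (-1)]) : Int × List Int))
      = (acc.1 + pvMn row, acc.2 ++ [pvAm row]) := fun _ _ => rfl
  simp only [this]
  rw [PySem.List.foldl_prod_mk (f := fun a row => a + pvMn row)
      (g := fun a row => a ++ [pvAm row]),
    PySem.List.foldl_add, PySem.List.foldl_append_singleton_eq_map]
  simp


theorem pv_range_map_getD (k : Nat) (xs : List (List Int)) (f : List Int → Int) (hk : k ≤ xs.length) :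
    (List.range k).map (fun i => f (xs.getD i [])) = (xs.take k).map f := by
  induction k with
  | zero => simp
  | succ k ih =>
    have hk' : k < xs.length := by omega
    have hsplit : xs.take (k+1) = xs.take k ++ [xs.getD k []] := by
      rw [List.take_succ, List.getElem?_eq_getElem hk', List.getD_eq_getElem xs [] hk']
      simp
    rw [List.range_succ, List.map_append, ih (by omega), hsplit, List.map_append]
    simp


theorem pv_tablesA (cm : List (List Int)) (hne : cm ≠ [])
    (hm : 0 < (cm.headD []).length)
    (hrows : ∀ r ∈ cm, r.length = (cm.headD []).length)
    (t : Nat) (ht : t < cm.length) :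
    (PySem.List.pyRange 1 (1 + (t : Int)) 1).foldl
        (pvStepA cm ((cm.headD []).length : Int))
        ([(PySem.List.pyRange 0 ((cm.headD []).length : Int) 1).map
            (fun j => PySem.List.pyGetD (cm.headD []) j 0)],
         [(PySem.List.pyRange 0 ((cm.headD []).length : Int) 1).map (fun _ => (-1 : Int))])
      = ((List.range (t+1)).map (fun i => (cm.getD i []).map
            (fun c => ((cm.take i).map pvMn).sum + c)),
         ((PySem.List.pyRange 0 ((cm.headD []).length : Int) 1).map (fun _ => (-1 : Int))) ::
           (List.range t).map (fun i => List.replicate (cm.headD []).length (pvAm (cm.getD i [])))) := by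
  induction t with
  | zero =>
    rw [show (1 + (0:Nat) : Int) = 1 by norm_num, PySem.List.pyRange_one_eq_nil le_rfl]
    obtain ⟨r0, rest, rfl⟩ := List.exists_cons_of_ne_nil hne
    simp [PySem.List.map_pyGetD_pyRange_zero']
  | succ t ih =>
    have ht' : t < cm.length := by omega
    rw [show (1 + ((t+1:Nat)) : Int) = (1 + (t:Int)) + 1 by push_cast; ring,
      PySem.List.pyRange_one_succ_right (by omega), List.foldl_append, ih ht']
    have hrt_mem : cm.getD t [] ∈ cm := by
      rw [List.getD_eq_getElem cm [] ht']; exact List.getElem_mem _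
    have hrt_len : (cm.getD t []).length = (cm.headD []).length := hrows _ hrt_mem
    have hrt_ne : cm.getD t [] ≠ [] :=
      List.ne_nil_of_length_pos (by omega : 0 < (cm.getD t []).length)
    have hr1_mem : cm.getD (t+1) [] ∈ cm := by
      rw [List.getD_eq_getElem cm [] ht]; exact List.getElem_mem _
    have hr1_len : (cm.getD (t+1) []).length = (cm.headD []).length := hrows _ hr1_mem
    simp only [List.foldl_cons, List.foldl_nil]
    unfold pvStepA
    have hidx2 : (1 + (t:Int)) = (((t+1:Nat)) : Int) := by push_cast; ring
    have hidx3 : ((((t+1:Nat)) : Int)) - 1 = ((t:Nat) : Int) := by push_cast; ring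
    simp only [hidx2, hidx3, PySem.List.pyGetD_natCast]
    have hprev : ((List.range (t+1)).map (fun i => (cm.getD i []).map
        (fun c => ((cm.take i).map pvMn).sum + c))).getD t []
        = (cm.getD t []).map (fun c => ((cm.take t).map pvMn).sum + c) :=
      PySem.List.getD_map_range _ _ _ _ (by omega)
    rw [hprev]
    set prev := (cm.getD t []).map (fun c => ((cm.take t).map pvMn).sum + c) with hprevdef
    have hprev_ne : prev ≠ [] := by
      rw [hprevdef]
      simpa using hrt_ne
    have hprev_len : ((cm.headD []).length : Int) = (prev.length : Int) := by
      rw [hprevdef, List.length_map, hrt_len]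
    have htake : ((cm.take (t+1)).map pvMn).sum
        = ((cm.take t).map pvMn).sum + pvMn (cm.getD t []) := by
      have hsp : cm.take (t+1) = cm.take t ++ [cm.getD t []] := by
        rw [List.take_succ, List.getElem?_eq_getElem ht', List.getD_eq_getElem cm [] ht']
        simp
      rw [hsp]; simp
    have hcell : ∀ (c : Int), pvCellA prev c ((cm.headD []).length : Int)
        = (some (((cm.take (t+1)).map pvMn).sum + c), pvAm (cm.getD t [])) := by
      intro c
      rw [hprev_len, pv_cellA_eq prev c hprev_ne, hprevdef, pv_mn_shift _ _ hrt_ne,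
        pv_am_shift _ _ hrt_ne, htake]
    simp only [hcell]
    simp only [Prod.mk.injEq]
    refine ⟨?_, ?_⟩
    · -- dp component
      conv_rhs => rw [List.range_succ, List.map_append]
      congr 1
      simp only [List.map_cons, List.map_nil, List.cons.injEq, and_true]
      rw [List.map_map]
      have hb : ((cm.headD []).length : Int) = ((cm.getD (t+1) []).length : Int) := by
        rw [hr1_len]
      rw [hb]
      calc (PySem.List.pyRange 0 ((cm.getD (t+1) []).length : Int) 1).map
            ((fun cell : Option Int × Int => cell.1.getD 0) ∘
              (fun j => (some (((cm.take (t+1)).map pvMn).sum + PySem.List.pyGetD (cm.getD (t+1) []) j 0),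
                pvAm (cm.getD t []))))
          = ((PySem.List.pyRange 0 ((cm.getD (t+1) []).length : Int) 1).map
              (fun j => PySem.List.pyGetD (cm.getD (t+1) []) j 0)).map
              (fun c => ((cm.take (t+1)).map pvMn).sum + c) := by
            rw [List.map_map]; rfl
        _ = (cm.getD (t+1) []).map (fun c => ((cm.take (t+1)).map pvMn).sum + c) := by
            rw [PySem.List.map_pyGetD_pyRange_zero']
    · -- path component
      rw [List.range_succ, List.map_append, List.map_map]
      simp only [List.cons_append]
      congr 1
      have hlen : ((PySem.List.pyRange 0 ((cm.headD []).length : Int) 1)).length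
          = (cm.headD []).length := by
        rw [PySem.List.length_pyRange_one]; omega
      simp [Function.comp_def, List.map_const']

theorem pv_backA_fold (cm : List (List Int)) (m N : Nat) (p0 : List Int)
    (hm : 0 < m) (hlen : ∀ i, i < N → (cm.getD i []).length = m)
    (a : Nat) (ha : a ≤ N) (v : Int) (acc : List Int) (hv0 : 0 ≤ v) (hvm : v < (m : Int)) :
    ((PySem.List.pyRange (a : Int) 0 (-1)).foldl
        (pvBackA (p0 :: (List.range N).map (fun i => List.replicate m (pvAm (cm.getD i [])))))
        (v, acc)).2
      = acc ++ ((List.range a).map (fun i => pvAm (cm.getD i []))).reverse := by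
  induction a generalizing v acc with
  | zero =>
    rw [show ((0:Nat) : Int) = 0 by norm_num, PySem.List.pyRange_neg_one_eq_nil le_rfl]
    simp
  | succ a iha =>
    rw [PySem.List.pyRange_neg_one_cons (by positivity : (0:Int) < ((a+1:Nat) : Int)),
      show (((a+1:Nat)) : Int) - 1 = ((a:Nat) : Int) by push_cast; ring, List.foldl_cons]
    have hra_len : (cm.getD a []).length = m := hlen a (by omega)
    have hra_ne : cm.getD a [] ≠ [] :=
      List.ne_nil_of_length_pos (by omega : 0 < (cm.getD a []).length)
    have hstep : pvBackA (p0 :: (List.range N).map (fun i => List.replicate m (pvAm (cm.getD i []))))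
        (v, acc) (((a+1:Nat)) : Int) = (pvAm (cm.getD a []), acc ++ [pvAm (cm.getD a [])]) := by
      unfold pvBackA
      rw [PySem.List.pyGetD_natCast]
      have h1 : (p0 :: (List.range N).map (fun i => List.replicate m (pvAm (cm.getD i [])))).getD
          (a+1) [] = List.replicate m (pvAm (cm.getD a [])) := by
        show ((List.range N).map (fun i => List.replicate m (pvAm (cm.getD i [])))).getD a []
          = List.replicate m (pvAm (cm.getD a []))
        exact PySem.List.getD_map_range _ _ _ _ (by omega)
      rw [h1]
      have h2 : PySem.List.pyGetD (List.replicate m (pvAm (cm.getD a []))) v (-1)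
          = pvAm (cm.getD a []) := by
        rw [PySem.List.pyGetD_eq_getElem _ _ hv0 (by simpa using hvm)]
        simp
      rw [h2]
    rw [hstep]
    have hb := pv_am_range (cm.getD a []) hra_ne
    rw [iha (by omega) _ _ (hb.1) (by rw [← hra_len]; exact hb.2)]
    rw [List.range_succ, List.map_append, List.reverse_append]
    simp

theorem pv_A_eq (cm : List (List Int)) (hne : cm ≠ [])
    (hm : 0 < (cm.headD []).length)
    (hrows : ∀ r ∈ cm, r.length = (cm.headD []).length) :
    supply_chain_optimization cm = ((cm.map pvMn).sum, cm.map pvAm) := by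
  have hn : 1 ≤ cm.length := List.length_pos_of_ne_nil hne
  simp only [supply_chain_optimization]
  rw [show (cm.length : Int) = 1 + ((cm.length - 1 : Nat) : Int) by omega]
  rw [pv_tablesA cm hne hm hrows (cm.length - 1) (by omega)]
  have hlast_mem : cm.getD (cm.length - 1) [] ∈ cm := by
    rw [List.getD_eq_getElem cm [] (by omega)]; exact List.getElem_mem _
  have hlast_len : (cm.getD (cm.length - 1) []).length = (cm.headD []).length :=
    hrows _ hlast_mem
  have hlast_ne : cm.getD (cm.length - 1) [] ≠ [] :=
    List.ne_nil_of_length_pos (by omega : 0 < (cm.getD (cm.length - 1) []).length)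
  have hsplit : cm = cm.take (cm.length - 1) ++ [cm.getD (cm.length - 1) []] := by
    conv_lhs => rw [← List.take_length (l := cm)]
    rw [show cm.length = (cm.length - 1) + 1 by omega, List.take_succ,
      List.getElem?_eq_getElem (by omega), List.getD_eq_getElem cm [] (by omega)]
    simp
  have hdp : PySem.List.pyGetD ((List.range ((cm.length - 1) + 1)).map
      (fun i => (cm.getD i []).map (fun c => ((cm.take i).map pvMn).sum + c))) (-1) []
      = (cm.getD (cm.length - 1) []).map
          (fun c => ((cm.take (cm.length - 1)).map pvMn).sum + c) := by
    rw [List.range_succ, List.map_append]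
    exact PySem.List.pyGetD_neg_one_append_singleton _ _ _
  simp only [hdp]
  set rlast := cm.getD (cm.length - 1) [] with hrlast
  set dpLast := rlast.map (fun c => ((cm.take (cm.length - 1)).map pvMn).sum + c) with hdpl
  have hdpl_ne : dpLast ≠ [] := by rw [hdpl]; simpa using hlast_ne
  have e1 : (PySem.List.min? dpLast (fun y => y)).getD 0 = pvMn dpLast := rfl
  have e2 : ((PySem.List.index? dpLast (pvMn dpLast)).map Int.ofNat).getD (-1) = pvAm dpLast := rfl
  rw [e1, e2]
  have hmn : pvMn dpLast = (cm.map pvMn).sum := by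
    rw [hdpl, pv_mn_shift _ _ hlast_ne]
    conv_rhs => rw [hsplit]
    simp
  have ham : pvAm dpLast = pvAm rlast := by rw [hdpl, pv_am_shift _ _ hlast_ne]
  have hbnd := pv_am_range rlast hlast_ne
  rw [ham]
  rw [show (1 + ((cm.length - 1 : Nat) : Int)) - 1 = ((cm.length - 1 : Nat) : Int) by ring]
  have hback := pv_backA_fold cm (cm.headD []).length (cm.length - 1)
    ((PySem.List.pyRange 0 ((cm.headD []).length : Int) 1).map (fun _ => (-1 : Int)))
    hm (fun i hi => hrows _ (by rw [List.getD_eq_getElem cm [] (by omega)]; exact List.getElem_mem _))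
    (cm.length - 1) le_rfl (pvAm rlast) [pvAm rlast] hbnd.1 (by omega)
  rw [Prod.mk.injEq]
  refine ⟨hmn, ?_⟩
  rw [hback]
  rw [pv_range_map_getD (cm.length - 1) cm pvAm (by omega)]
  conv_rhs => rw [hsplit]
  simp

-- ===== VERDICT (by name: the statement is the Claim_ definition above) =====
theorem supply_chain_optimization_spec : Claim_equal_supply_chain_optimization := by
  intro cm _ hpre
  obtain ⟨hne, hm, hrows⟩ := hpre
  unfold Spec_supply_chain_optimization
  rw [pv_A_eq cm hne hm hrows, pv_alt_eq]
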